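-- pv_equiv track=rewrite | github.com/ohadren-source/TORQ-e | status_reports/data_crawler_integrated.py | _should_follow_link
-- ===== SOURCE A (Python) =====
-- def _should_follow_link(url: str) -> bool:
--     """
--     Determine if we should follow this link
--     """
--     # Skip common non-data pages
--     skip_patterns = [
--         "/login", "/signin", "/logout",
--         "/search", "/search?",
--         "/contact", "/about",
--         "/help", "/faq",
--         ".pdf", ".doc", ".jpg", ".png", ".gif"
--     ]
--
--     url_lower = url.lower()
--     for pattern in skip_patterns:
--         if pattern in url_lower:
--             return False
--
--     return True
-- ===== SOURCE B (Python) =====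
-- # skip patterns, same set as the original (note "/search?" contains no space, so split is safe)
-- _SKIP_PATTERNS = (
--     "/login /signin /logout /search /search? /contact /about /help /faq"
--     " .pdf .doc .jpg .png .gif"
-- ).split()
--
--
-- def _should_follow_link(url: str) -> bool:
--     """
--     Determine if we should follow this link (position-driven single scan:
--     walk the lowercased URL once and test, at each position, whether any
--     skip pattern starts there).
--     """
--     u = url.lower()
--     for i in range(len(u)):
--         for p in _SKIP_PATTERNS:
--             if u.startswith(p, i):
--                 return False
--     return True
-- ===== Notes on version B (the rewrite author's own statement) =====
-- stated objective: alternative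
-- what changed: Replaces the pattern-driven loop (each pattern scanned through the whole URL with 'in') by a position-driven scan: one walk over the lowercased URL testing at each index whether any skip pattern starts there (startswith with offset), so the substring search primitive disappears.
import Mathlib
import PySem

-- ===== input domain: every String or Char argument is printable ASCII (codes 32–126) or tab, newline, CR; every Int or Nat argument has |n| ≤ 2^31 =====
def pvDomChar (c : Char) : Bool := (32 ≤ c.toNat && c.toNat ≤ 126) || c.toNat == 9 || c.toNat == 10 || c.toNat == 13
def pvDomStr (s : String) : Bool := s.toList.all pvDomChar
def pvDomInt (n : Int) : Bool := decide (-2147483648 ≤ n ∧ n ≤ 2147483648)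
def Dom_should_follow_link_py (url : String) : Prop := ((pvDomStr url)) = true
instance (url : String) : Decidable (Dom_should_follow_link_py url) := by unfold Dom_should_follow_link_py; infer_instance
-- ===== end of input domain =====

-- B replaces A's pattern-driven loop (each pattern searched in the whole URL) by a single
-- position-driven scan of the lowercased URL that tests at each position whether any skip
-- pattern starts there (alternative decomposition, same cost).


-- ===== PORT A =====
-- A's pattern list, in source order
def pvSkipA : List String :=
  ["/login", "/signin", "/logout",
   "/search", "/search?",
   "/contact", "/about",
   "/help", "/faq",
   ".pdf", ".doc", ".jpg", ".png", ".gif"]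

-- A's loop: for pattern in skip_patterns: if pattern in url_lower: return False
def pvLoopA (url_lower : String) : List String → Bool
  | [] => true
  | p :: rest => if PySem.Str.isIn p url_lower then false else pvLoopA url_lower rest

def should_follow_link_py (url : String) : Bool :=
  pvLoopA (PySem.Str.lower url) pvSkipA

-- ===== PORT B =====
-- B's pattern tuple, as character lists (B compares character-wise via startswith-at-offset)
def pvSkipB : List (List Char) :=
  ["/login".toList, "/signin".toList, "/logout".toList,
   "/search".toList, "/search?".toList,
   "/contact".toList, "/about".toList,
   "/help".toList, "/faq".toList,
   ".pdf".toList, ".doc".toList, ".jpg".toList, ".png".toList, ".gif".toList]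

-- B's scan: at each position of the lowercased URL, does some pattern start here?
def pvScanB (cs : List Char) : Bool :=
  match cs with
  | [] => true
  | c :: t => if pvSkipB.any (fun p => p.isPrefixOf (c :: t)) then false else pvScanB t

def should_follow_link_py_alt (url : String) : Bool :=
  pvScanB (PySem.Chars.lower url.toList)

-- ===== PRECONDITION & SPEC =====
def Spec_should_follow_link_py (url : String) (out : Bool) : Prop := out = should_follow_link_py_alt url
instance (url : String) (out : Bool) : Decidable (Spec_should_follow_link_py url out) := by unfold Spec_should_follow_link_py; infer_instance

-- ===== CLAIM (what is proved, stated in full; the proofs are below) =====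
def Claim_equal_should_follow_link_py : Prop := ∀ (url : String), Dom_should_follow_link_py url → Spec_should_follow_link_py url (should_follow_link_py url)

-- ===== LEMMAS AND PROOFS =====

-- A's loop returns true iff no pattern of ps occurs in u
theorem pvLoopA_eq_true_iff (u : String) (ps : List String) :
    pvLoopA u ps = true ↔ ∀ p ∈ ps, PySem.Str.isIn p u = false := by
  induction ps with
  | nil => simp [pvLoopA]
  | cons p rest ih =>
    simp only [pvLoopA]
    split_ifs with h
    · simp only [false_iff]
      intro hall
      rw [hall p (List.mem_cons_self ..)] at h
      exact Bool.false_ne_true h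
    · have h' : PySem.Str.isIn p u = false := by
        revert h; cases PySem.Str.isIn p u <;> simp
      rw [ih, List.forall_mem_cons]
      exact (and_iff_right h').symm

-- B's scan returns true iff no pattern of pvSkipB is a prefix of any suffix of cs
theorem pvScanB_eq_true_iff (cs : List Char) :
    pvScanB cs = true ↔ ∀ p ∈ pvSkipB, ∀ j, ¬ p <+: cs.drop j := by
  induction cs with
  | nil =>
    simp only [pvScanB, List.drop_nil, List.prefix_nil, true_iff]
    intro p hp j hpe
    subst hpe
    revert hp; decide
  | cons c t ih =>
    simp only [pvScanB]
    split_ifs with h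
    · simp only [false_iff]
      rw [List.any_eq_true] at h
      obtain ⟨p, hp, hpre⟩ := h
      rw [List.isPrefixOf_iff_prefix] at hpre
      exact fun hall => hall p hp 0 (by simpa using hpre)
    · rw [ih]
      constructor
      · intro hall p hp j
        cases j with
        | zero =>
          intro hpre
          exact h (List.any_eq_true.mpr
            ⟨p, hp, List.isPrefixOf_iff_prefix.mpr (by simpa using hpre)⟩)
        | succ j => exact hall p hp j
      · intro hall p hp j
        exact hall p hp (j + 1)

-- the two pattern lists correspond entry by entry
theorem pvSkipB_eq : pvSkipB = pvSkipA.map String.toList := by decide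

theorem should_follow_link_py_spec : Claim_equal_should_follow_link_py := by
  intro url _
  unfold Spec_should_follow_link_py
  unfold should_follow_link_py should_follow_link_py_alt
  have hl : (PySem.Str.lower url).toList = PySem.Chars.lower url.toList := by
    simp [pysem]
  rcases hA : pvLoopA (PySem.Str.lower url) pvSkipA with _ | _
  · -- A returned false: some pattern occurs in the lowered url, so B's scan finds it too
    have hnot : ¬ (pvLoopA (PySem.Str.lower url) pvSkipA = true) := by simp [hA]
    rw [pvLoopA_eq_true_iff] at hnot
    push Not at hnot
    obtain ⟨p, hp, hin⟩ := hnot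
    have hin' : PySem.Str.isIn p (PySem.Str.lower url) = true := by
      revert hin; cases PySem.Str.isIn p (PySem.Str.lower url) <;> simp
    rw [PySem.Str.isIn_iff_infix, hl] at hin'
    obtain ⟨j, hpre⟩ := (PySem.Chars.exists_prefix_drop_iff_isIn
      (sub := p.toList) (s := PySem.Chars.lower url.toList)).mpr
      ((PySem.Chars.isIn_iff_infix _ _).mpr hin')
    have hB : ¬ (pvScanB (PySem.Chars.lower url.toList) = true) := by
      rw [pvScanB_eq_true_iff]
      push Not
      exact ⟨p.toList, by rw [pvSkipB_eq]; exact List.mem_map_of_mem hp, j, hpre⟩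
    have hB' : pvScanB (PySem.Chars.lower url.toList) = false := by
      revert hB; cases pvScanB (PySem.Chars.lower url.toList) <;> simp
    exact hB'.symm
  · -- A returned true: no pattern occurs, so B's scan finds nothing
    rw [pvLoopA_eq_true_iff] at hA
    have hB : pvScanB (PySem.Chars.lower url.toList) = true := by
      rw [pvScanB_eq_true_iff]
      intro p hp j hpre
      rw [pvSkipB_eq, List.mem_map] at hp
      obtain ⟨q, hq, rfl⟩ := hp
      have hin := hA q hq
      rw [← Bool.not_eq_true, PySem.Str.isIn_iff_infix, hl] at hin
      exact hin ((PySem.Chars.isIn_iff_infix _ _).mp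
        ((PySem.Chars.exists_prefix_drop_iff_isIn _ _).mp ⟨j, hpre⟩))
    exact hB.symm
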